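-- pv_equiv track=rewrite | github.com/hienpham15/Bioinformatics_contest | Problem1/Problem1.py | func
-- ===== SOURCE A (Python) =====
-- from collections import Counter
--
-- def func(string_list, n_bits, l):
--
--     combinations = []
--     for i in range(l):
--         bits = ''
--         if n_bits != 1 :
--             for j in range(n_bits):
--                 bits += string_list[j][i]
--         else:
--             bits += string_list[0][i]
--         combinations.append(bits)
--
--     counts = Counter(combinations)
--     n_class = len(counts)
--
--     ith_class = 1
--     encode_dict = dict()
--
--     for element in counts:
--         encode_dict.update({element: ith_class})
--         ith_class += 1
--
--     states = []
--     for com in combinations: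
--         encode_val = encode_dict[com]
--         states.append(encode_val)
--
--     return n_class, states
-- ===== SOURCE B (Python) =====
-- def func(string_list, n_bits, l):
--     prefix = string_list[:n_bits] if n_bits > 0 else []
--     encode = {}
--     states = []
--     for i in range(l):
--         com = ''.join(s[i] for s in prefix)
--         if com not in encode:
--             encode[com] = len(encode) + 1
--         states.append(encode[com])
--     return len(encode), states
-- ===== Notes on version B (the rewrite author's own statement) =====
-- stated objective: simpler
-- what changed: B replaces A's four passes (build combinations, Counter them, number the Counter's keys in a second dict, then map the combinations through that dict) by one single pass that slices the first n_bits rows once and, per column, joins the bits and assigns a fresh id on first sight via one dict.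
import Mathlib
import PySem

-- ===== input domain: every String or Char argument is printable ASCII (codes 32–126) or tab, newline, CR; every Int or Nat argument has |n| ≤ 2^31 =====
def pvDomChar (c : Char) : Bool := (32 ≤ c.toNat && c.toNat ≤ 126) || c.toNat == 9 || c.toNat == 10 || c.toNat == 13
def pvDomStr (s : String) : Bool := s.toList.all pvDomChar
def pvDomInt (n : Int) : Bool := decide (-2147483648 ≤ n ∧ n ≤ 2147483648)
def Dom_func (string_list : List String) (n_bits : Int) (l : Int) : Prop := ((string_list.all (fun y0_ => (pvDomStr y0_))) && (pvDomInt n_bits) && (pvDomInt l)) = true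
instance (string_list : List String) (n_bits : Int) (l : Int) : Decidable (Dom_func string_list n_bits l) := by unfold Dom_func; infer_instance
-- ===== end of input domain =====

-- B folds A's four passes (combinations, Counter, key numbering, mapping) into one
-- first-seen labelling pass over the columns (objective: simpler).
-- Combinations (Python str values) are represented as List Char; out-of-range character
-- access uses a default (' ' / "") exactly where Python would raise — excluded by Pre_func.

-- ===== PORT A =====
def funcBits (string_list : List String) (n_bits : Int) (i : Int) : List Char :=
  if n_bits ≠ 1 then
    (PySem.List.pyRange 0 n_bits).foldl
      (fun bits j => bits ++ [PySem.List.pyGetD (PySem.List.pyGetD string_list j "").toList i ' ']) []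
  else
    [] ++ [PySem.List.pyGetD (PySem.List.pyGetD string_list 0 "").toList i ' ']

def funcCombos (string_list : List String) (n_bits : Int) (l : Int) : List (List Char) :=
  (PySem.List.pyRange 0 l).foldl (fun cs i => cs ++ [funcBits string_list n_bits i]) []

def func (string_list : List String) (n_bits : Int) (l : Int) : Int × List Int :=
  let combinations := funcCombos string_list n_bits l
  let counts : PySem.Dict (List Char) Int := PySem.Dict.counter combinations
  let n_class : Int := counts.size
  let encode := (counts.keys.foldl
      (fun (p : PySem.Dict (List Char) Int × Int) k => (p.1.insert k p.2, p.2 + 1))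
      (PySem.Dict.empty, 1)).1
  -- encode_dict[com]: every com is a key of counts, so the KeyError default 0 is never used
  let states := combinations.foldl (fun st com => st ++ [encode.getD com 0]) []
  (n_class, states)

-- ===== PORT B =====
def altCom (pre : List String) (i : Int) : List Char :=
  pre.map (fun s => PySem.List.pyGetD s.toList i ' ')   -- ''.join(s[i] for s in prefix)

def bstep (p : PySem.Dict (List Char) Int × List Int) (com : List Char) :
    PySem.Dict (List Char) Int × List Int :=
  let e := if p.1.contains com then p.1 else p.1.insert com ((p.1.size : Int) + 1)
  (e, p.2 ++ [e.getD com 0])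

def func_alt (string_list : List String) (n_bits : Int) (l : Int) : Int × List Int :=
  let pre := if 0 < n_bits then PySem.List.slice string_list none (some n_bits) else []
  let r := (PySem.List.pyRange 0 l).foldl
      (fun p i => bstep p (altCom pre i)) (PySem.Dict.empty, [])
  ((r.1.size : Int), r.2)

-- ===== PRECONDITION & SPEC =====
-- Pre_func admits exactly the inputs where A returns normally: A raises IndexError as soon
-- as some accessed row string_list[j] (j < n_bits, resp. j = 0 when n_bits == 1) is missing
-- or shorter than l.
def Pre_func (string_list : List String) (n_bits : Int) (l : Int) : Prop :=
  l ≤ 0 ∨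
    (if n_bits = 1 then
       string_list ≠ [] ∧ l ≤ ((string_list.headD "").toList.length : Int)
     else
       n_bits ≤ (string_list.length : Int) ∧
         ∀ s ∈ string_list.take n_bits.toNat, l ≤ (s.toList.length : Int))
instance (string_list : List String) (n_bits : Int) (l : Int) : Decidable (Pre_func string_list n_bits l) := by unfold Pre_func; infer_instance
def pvWitness_func : List String × Int × Int := (["01", "10"], 2, 2)

def Spec_func (string_list : List String) (n_bits : Int) (l : Int) (out : Int × List Int) : Prop := out = func_alt string_list n_bits l
instance (string_list : List String) (n_bits : Int) (l : Int) (out : Int × List Int) : Decidable (Spec_func string_list n_bits l out) := by unfold Spec_func; infer_instance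

-- ===== CLAIM (what is proved, stated in full; the proofs are below) =====
def Claim_equal_func : Prop := ∀ (string_list : List String) (n_bits : Int) (l : Int), Dom_func string_list n_bits l → Pre_func string_list n_bits l → Spec_func string_list n_bits l (func string_list n_bits l)

-- ===== LEMMAS AND PROOFS =====

-- an empty Python range
lemma pyRange_zero_nonpos {b : Int} (hb : b ≤ 0) : PySem.List.pyRange 0 b = [] := by
  refine List.eq_nil_iff_forall_not_mem.mpr (fun x hx => ?_)
  have := PySem.List.mem_pyRange_one.mp hx
  omega

-- pyRange-indexed map of a prefix of xs is take
lemma map_pyGetD_pyRange_take {α : Type} (xs : List α) (d : α) {n : Int}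
    (h0 : 0 ≤ n) (h1 : n ≤ (xs.length : Int)) :
    (PySem.List.pyRange 0 n).map (fun j => PySem.List.pyGetD xs j d) = xs.take n.toNat := by
  have hlen : ((xs.take n.toNat).length : Int) = n := by
    simp [List.length_take]; omega
  have hbase := PySem.List.map_pyGetD_pyRange_zero (xs.take n.toNat) d
  have hlen' : PySem.List.len (xs.take n.toNat) = n := by
    simp [PySem.List.len] at hbase ⊢
    omega
  rw [hlen'] at hbase
  rw [← hbase]
  refine List.map_congr_left (fun j hj => ?_)
  have hjb := PySem.List.mem_pyRange_one.mp hj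
  rw [PySem.List.pyGetD_eq_getElem xs d hjb.1 (by omega),
      PySem.List.pyGetD_eq_getElem (xs.take n.toNat) d hjb.1 (by simp [List.length_take]; omega)]
  simp [List.getElem_take]

-- under Pre_ (with a live column), each column's combination agrees between the ports
lemma bits_eq (string_list : List String) (n_bits : Int) (i : Int)
    (h1 : n_bits = 1 → string_list ≠ [])
    (h2 : n_bits ≠ 1 → 0 < n_bits → n_bits ≤ (string_list.length : Int)) :
    altCom (if 0 < n_bits then PySem.List.slice string_list none (some n_bits) else []) i
      = funcBits string_list n_bits i := by
  by_cases hnb : n_bits = 1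
  · subst hnb
    obtain ⟨s, t, rfl⟩ := List.exists_cons_of_ne_nil (h1 rfl)
    rw [if_pos (by omega : (0:Int) < 1), PySem.List.slice_to _ (by omega : (0:Int) ≤ 1)]
    simp [funcBits, altCom]
  · rw [funcBits, if_pos hnb]
    by_cases hpos : 0 < n_bits
    · rw [if_pos hpos,
        PySem.List.foldl_append_singleton_eq_map
          (fun j => PySem.List.pyGetD (PySem.List.pyGetD string_list j "").toList i ' ') _ [],
        PySem.List.slice_to _ (le_of_lt hpos)]
      have := map_pyGetD_pyRange_take string_list "" (le_of_lt hpos) (h2 hnb hpos)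
      rw [altCom, ← this, List.map_map, List.nil_append]
      rfl
    · rw [if_neg hpos, pyRange_zero_nonpos (by omega)]
      simp [altCom]

-- A's combinations as a map
lemma funcCombos_eq_map (string_list : List String) (n_bits : Int) (l : Int) :
    funcCombos string_list n_bits l
      = (PySem.List.pyRange 0 l).map (funcBits string_list n_bits) := by
  rw [funcCombos, PySem.List.foldl_append_singleton_eq_map]
  simp

-- the id-assignment fold of A: key k gets id i0 + (position of k in ks)
lemma encode_get? (ks : List (List Char)) (d : PySem.Dict (List Char) Int) (i0 : Int)
    (c : List Char) (hnd : ks.Nodup) :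
    ((ks.foldl (fun (p : PySem.Dict (List Char) Int × Int) k => (p.1.insert k p.2, p.2 + 1))
        (d, i0)).1).get? c
      = if c ∈ ks then some (i0 + (List.idxOf c ks : Int)) else d.get? c := by
  induction ks generalizing d i0 with
  | nil => simp
  | cons k t ih =>
    rw [List.foldl_cons]
    rw [ih _ _ (List.nodup_cons.mp hnd).2]
    by_cases hct : c ∈ t
    · have hck : c ≠ k := fun h => (List.nodup_cons.mp hnd).1 (h ▸ hct)
      rw [if_pos hct, if_pos (List.mem_cons_of_mem _ hct), List.idxOf_cons_ne _ (fun h => hck h.symm)]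
      congr 1
      push_cast
      ring
    · rw [if_neg hct]
      by_cases hck : c = k
      · subst hck
        rw [PySem.Dict.get?_insert_self, if_pos (List.mem_cons_self), List.idxOf_cons_self]
        simp
      · rw [PySem.Dict.get?_insert_of_ne _ _ hck, if_neg (by simp [hck, hct])]

-- A's full characterisation: class count and first-appearance ids over the distinct combos
lemma funcA_char (string_list : List String) (n_bits : Int) (l : Int) :
    func string_list n_bits l
      = (((PySem.Set.ofList (funcCombos string_list n_bits l)).length : Int),
         (funcCombos string_list n_bits l).map
           (fun c => 1 + (List.idxOf c (PySem.Set.ofList (funcCombos string_list n_bits l)) : Int))) := by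
  rw [func]
  set cs := funcCombos string_list n_bits l with hcs
  refine Prod.ext ?_ ?_
  · show ((PySem.Dict.counter cs).size : Int) = _
    simp [PySem.Dict.size, PySem.Dict.items_counter]
  · show cs.foldl (fun st com => st ++ [_]) [] = _
    rw [PySem.List.foldl_append_singleton_eq_map, List.nil_append]
    refine List.map_congr_left (fun c hc => ?_)
    rw [PySem.Dict.getD, PySem.Dict.keys_counter,
        encode_get? _ _ _ _ (PySem.Set.nodup_ofList cs),
        if_pos ((PySem.Set.mem_ofList cs c).mpr hc)]
    rfl

-- ----- B's single-pass invariant -----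
def Pinv (ks : List (List Char)) (d : PySem.Dict (List Char) Int) : Prop :=
  d.size = ks.length ∧
    ∀ c, d.get? c = if c ∈ ks then some (1 + (List.idxOf c ks : Int)) else none

lemma set_add_mem {α : Type} [BEq α] [LawfulBEq α] (ks : List α) (x c : α) (h : c ∈ ks) :
    c ∈ PySem.Set.add ks x ∧ List.idxOf c (PySem.Set.add ks x) = List.idxOf c ks := by
  rw [PySem.Set.add]
  split
  · exact ⟨h, rfl⟩
  · exact ⟨List.mem_append_left _ h, List.idxOf_append_of_mem h⟩

lemma idxOf_update (cs : List (List Char)) (ks : List (List Char)) (c : List Char) (h : c ∈ ks) :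
    c ∈ PySem.Set.update ks cs ∧ List.idxOf c (PySem.Set.update ks cs) = List.idxOf c ks := by
  induction cs generalizing ks with
  | nil => exact ⟨h, rfl⟩
  | cons x t ih =>
    have hadd := set_add_mem ks x c h
    have := ih (PySem.Set.add ks x) hadd.1
    exact ⟨this.1, this.2.trans hadd.2⟩

lemma foldB (cs : List (List Char)) (ks : List (List Char)) (d : PySem.Dict (List Char) Int)
    (acc : List Int) (h : Pinv ks d) :
    (cs.foldl bstep (d, acc)).2
        = acc ++ cs.map (fun c => 1 + (List.idxOf c (PySem.Set.update ks cs) : Int))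
      ∧ Pinv (PySem.Set.update ks cs) (cs.foldl bstep (d, acc)).1 := by
  induction cs generalizing ks d acc with
  | nil => exact ⟨by simp, h⟩
  | cons c t ih =>
    have hupd : PySem.Set.update ks (c :: t) = PySem.Set.update (PySem.Set.add ks c) t := rfl
    by_cases hc : c ∈ ks
    · have hget : d.get? c = some (1 + (List.idxOf c ks : Int)) := by rw [h.2 c, if_pos hc]
      have hcont : d.contains c = true := by
        rw [PySem.Dict.contains_eq_isSome_get?, hget]; rfl
      have hadd : PySem.Set.add ks c = ks := by
        rw [PySem.Set.add, if_pos (by simpa using hc)]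
      have hstep : bstep (d, acc) c = (d, acc ++ [1 + (List.idxOf c ks : Int)]) := by
        simp [bstep, hcont, PySem.Dict.getD, hget]
      rw [List.foldl_cons, hstep]
      obtain ⟨h1, h2⟩ := ih ks d (acc ++ [1 + (List.idxOf c ks : Int)]) h
      rw [hupd, hadd]
      refine ⟨?_, h2⟩
      rw [h1, List.map_cons, List.append_assoc]
      congr 2
      rw [List.singleton_append]
      congr 2
      exact_mod_cast ((idxOf_update t ks c hc).2).symm
    · have hget : d.get? c = none := by rw [h.2 c, if_neg hc]
      have hcont : d.contains c = false := by
        rw [PySem.Dict.contains_eq_isSome_get?, hget]; rfl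
      have hadd : PySem.Set.add ks c = ks ++ [c] := by
        rw [PySem.Set.add, if_neg (by simpa using hc)]
      have hsz : ((d.insert c ((d.size : Int) + 1)).size : Nat) = ks.length + 1 := by
        rw [PySem.Dict.size_insert, hcont]; simp [h.1]
      have hP : Pinv (ks ++ [c]) (d.insert c ((d.size : Int) + 1)) := by
        constructor
        · simpa using hsz
        · intro c'
          by_cases hcc : c' = c
          · subst hcc
            rw [PySem.Dict.get?_insert_self,
                if_pos (List.mem_append_right _ (List.mem_singleton_self _)),
                List.idxOf_append, if_neg hc]
            simp [h.1]
            ring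
          · rw [PySem.Dict.get?_insert_of_ne _ _ hcc, h.2 c']
            have hmem : c' ∈ ks ++ [c] ↔ c' ∈ ks := by simp [hcc]
            by_cases hm : c' ∈ ks
            · rw [if_pos hm, if_pos (hmem.mpr hm), List.idxOf_append_of_mem hm]
            · rw [if_neg hm, if_neg (fun h' => hm (hmem.mp h'))]
      have hval : (d.insert c ((d.size : Int) + 1)).getD c 0 = 1 + (ks.length : Int) := by
        rw [PySem.Dict.getD, PySem.Dict.get?_insert_self]
        simp [h.1]
        ring
      have hstep : bstep (d, acc) c
          = (d.insert c ((d.size : Int) + 1), acc ++ [1 + (ks.length : Int)]) := by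
        simp [bstep, hcont, hval]
      rw [List.foldl_cons, hstep]
      obtain ⟨h1, h2⟩ := ih (ks ++ [c]) _ (acc ++ [1 + (ks.length : Int)]) hP
      rw [hupd, hadd]
      refine ⟨?_, h2⟩
      rw [h1, List.map_cons, List.append_assoc]
      congr 2
      rw [List.singleton_append]
      congr 2
      have hmem : c ∈ ks ++ [c] := List.mem_append_right _ (List.mem_singleton_self _)
      rw [(idxOf_update t (ks ++ [c]) c hmem).2, List.idxOf_append, if_neg hc]
      simp

lemma Pinv_empty : Pinv [] PySem.Dict.empty := by
  constructor
  · rfl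
  · intro c; simp [PySem.Dict.get?_empty]

-- B's full characterisation over any list of column combinations
lemma funcB_char (coms : List (List Char)) :
    ((((coms.foldl bstep (PySem.Dict.empty, [])).1.size : Int),
       (coms.foldl bstep (PySem.Dict.empty, [])).2) : Int × List Int)
      = (((PySem.Set.ofList coms).length : Int),
         coms.map (fun c => 1 + (List.idxOf c (PySem.Set.ofList coms) : Int))) := by
  obtain ⟨h1, h2⟩ := foldB coms [] PySem.Dict.empty [] Pinv_empty
  have hof : PySem.Set.update [] coms = PySem.Set.ofList coms := rfl
  refine Prod.ext ?_ ?_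
  · show ((coms.foldl bstep (PySem.Dict.empty, [])).1.size : Int) = _
    rw [h2.1, hof]
  · show (coms.foldl bstep (PySem.Dict.empty, [])).2 = _
    rw [h1, hof, List.nil_append]

-- ===== VERDICT (by name: the statement is the Claim_ definition above) =====
theorem func_spec : Claim_equal_func := by
  intro string_list n_bits l _hdom hpre
  show func string_list n_bits l = func_alt string_list n_bits l
  rw [funcA_char]
  rw [func_alt]
  show _ = ((((PySem.List.pyRange 0 l).foldl _ (PySem.Dict.empty, [])).1.size : Int),
            ((PySem.List.pyRange 0 l).foldl _ (PySem.Dict.empty, [])).2)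
  have hfold :
      (PySem.List.pyRange 0 l).foldl
          (fun p i => bstep p (altCom (if 0 < n_bits then PySem.List.slice string_list none (some n_bits) else []) i))
          (PySem.Dict.empty, [])
        = (funcCombos string_list n_bits l).foldl bstep (PySem.Dict.empty, []) := by
    rw [← List.foldl_map]
    congr 1
    rw [funcCombos_eq_map]
    refine List.map_congr_left (fun i hi => ?_)
    have hib := PySem.List.mem_pyRange_one.mp hi
    have hl : ¬ l ≤ 0 := by omega
    refine bits_eq string_list n_bits i ?_ ?_
    · intro h1
      rcases hpre with h | h
      · omega
      · rw [if_pos h1] at h; exact h.1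
    · intro hne _
      rcases hpre with h | h
      · omega
      · rw [if_neg hne] at h; exact h.1
  rw [hfold, funcB_char]
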